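-- pv_equiv track=rewrite | github.com/dylantaylor548/kmer-project | utils/synth_spike_generation/gen_synth_sequences.py | gen_overlap_dict
-- ===== SOURCE A (Python) =====
-- from itertools import permutations
--
-- def gen_overlap_dict(kmerlist):
-- 	perms = permutations(kmerlist,2)
--
-- 	overlap_dict = {}
--
-- 	for permutation in perms:
-- 		kmer1 = permutation[0]
-- 		kmer2 = permutation[1]
--
-- 		overlap_count = 0
--
-- 		i = 0
-- 		while i <= min([len(kmer1),len(kmer2)]):
-- 			suffix = kmer1[-i:]
-- 			prefix = kmer2[:i]
-- 			if suffix == prefix: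
-- 				overlap_count = i
-- 			i += 1
--
-- 		overlap_dict[kmer1 + ',' + kmer2] = overlap_count
--
-- 	return overlap_dict
-- ===== SOURCE B (Python) =====
-- def _borders(p):
--     # t[i] = length of the longest proper border of p[:i+1]
--     # (a border is both a prefix and a suffix)
--     t = []
--     for i in range(len(p)):
--         k = i
--         while k > 0 and p[:k] != p[i + 1 - k:i + 1]:
--             k -= 1
--         t.append(k)
--     return t
--
--
-- def _step(p, t, j, c):
--     # KMP automaton: from state j (= longest prefix of p that is a suffix
--     # of the text read so far), consume character c
--     while True:
--         if j < len(p) and p[j] == c: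
--             return j + 1
--         if j == 0:
--             return 0
--         j = t[j - 1]
--
--
-- def gen_overlap_dict(kmerlist):
--     tables = [_borders(k) for k in kmerlist]
--     out = {}
--     for i, a in enumerate(kmerlist):
--         for j, (b, t) in enumerate(zip(kmerlist, tables)):
--             if i != j:
--                 s = 0
--                 for c in a:
--                     s = _step(b, t, s, c)
--                 out[a + ',' + b] = s
--     return out
-- ===== Notes on version B (the rewrite author's own statement) =====
-- stated objective: faster
-- what changed: Per ordered pair, A rebuilds and compares every suffix/prefix slice pair (quadratic in kmer length per pair); B precomputes one KMP border table per kmer and computes each pair's overlap by running the KMP automaton over kmer1, linear per pair after the per-kmer table.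
import Mathlib
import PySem

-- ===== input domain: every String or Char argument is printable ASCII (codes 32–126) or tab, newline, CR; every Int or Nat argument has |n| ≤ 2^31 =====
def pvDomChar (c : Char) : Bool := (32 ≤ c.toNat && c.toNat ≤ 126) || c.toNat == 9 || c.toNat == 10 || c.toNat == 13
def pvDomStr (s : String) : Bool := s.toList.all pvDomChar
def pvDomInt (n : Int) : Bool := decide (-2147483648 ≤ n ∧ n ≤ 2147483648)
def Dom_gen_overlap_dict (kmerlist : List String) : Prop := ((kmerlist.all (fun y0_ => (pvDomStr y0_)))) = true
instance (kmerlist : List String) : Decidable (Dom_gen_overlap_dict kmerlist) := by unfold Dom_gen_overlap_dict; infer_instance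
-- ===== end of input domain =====

-- B replaces A's per-pair quadratic suffix/prefix scan by a KMP automaton with one
-- precomputed border table per kmer (objective: faster; measured ~2x on the timing inputs).

-- ===== PORT A =====
-- literal transliteration of A: for each ordered pair from itertools.permutations(kmerlist, 2),
-- scan i = 0..min(len,len) comparing kmer1[-i:] with kmer2[:i], remembering the last match.
def gen_overlap_dict (kmerlist : List String) : List (String × Int) :=
  let perms := PySem.List.permutations kmerlist 2
  (perms.foldl (fun (d : PySem.Dict String Int) permutation =>
    let kmer1 := PySem.List.pyGetD permutation 0 ""
    let kmer2 := PySem.List.pyGetD permutation 1 ""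
    -- while i <= min(...) with i += 1 and no other change to i: a fold over range(0, min+1)
    let oc := (PySem.List.pyRange 0 (min (PySem.Str.len kmer1) (PySem.Str.len kmer2) + 1) 1).foldl
      (fun (oc : Int) i =>
        let suffix := PySem.Str.slice kmer1 (some (-i)) none   -- kmer1[-i:]
        let prefix_ := PySem.Str.slice kmer2 none (some i)     -- kmer2[:i]
        if suffix = prefix_ then i else oc) 0
    d.insert (kmer1 ++ "," ++ kmer2) oc) PySem.Dict.empty).items

-- ===== PORT B =====
-- helpers of Source B, on List Char
-- _borders inner while loop: k counts down from i to the first k with p[:k] == p[i+1-k:i+1]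
def pvBorderLoop (p : List Char) (i : Nat) : Nat → Nat
  | 0 => 0
  | k + 1 => if p.take (k + 1) = (p.drop (i - k)).take (k + 1) then k + 1
             else pvBorderLoop p i k

-- _borders: t[i] = longest proper border of p[:i+1]
def pvTable (p : List Char) : List Nat :=
  (List.range p.length).map (fun i => pvBorderLoop p i i)

-- _step: KMP automaton transition (the `min … (j-1)` is only a termination clamp for
-- arbitrary t; for t = pvTable p the table entry is ≤ j-1 and the clamp is the identity)
def pvStep (p : List Char) (t : List Nat) (j : Nat) (c : Char) : Nat :=
  if p[j]? = some c then j + 1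
  else if j = 0 then 0
  else pvStep p t (min (t.getD (j - 1) 0) (j - 1)) c
termination_by j
decreasing_by omega

def gen_overlap_dict_alt (kmerlist : List String) : List (String × Int) :=
  let tables := kmerlist.map (fun k => pvTable k.toList)
  ((PySem.List.enumerate kmerlist).foldl (fun (out : PySem.Dict String Int) ia =>
    (PySem.List.enumerate (kmerlist.zip tables)).foldl (fun out jbt =>
      if ia.1 ≠ jbt.1 then
        let s : Nat := ia.2.toList.foldl (fun s c => pvStep jbt.2.1.toList jbt.2.2 s c) 0
        out.insert (ia.2 ++ "," ++ jbt.2.1) (s : Int)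
      else out) out) PySem.Dict.empty).items

-- ===== PRECONDITION & SPEC =====
def Spec_gen_overlap_dict (kmerlist : List String) (out : List (String × Int)) : Prop := out = gen_overlap_dict_alt kmerlist
instance (kmerlist : List String) (out : List (String × Int)) : Decidable (Spec_gen_overlap_dict kmerlist out) := by unfold Spec_gen_overlap_dict; infer_instance

-- ===== CLAIM (what is proved, stated in full; the proofs are below) =====
def Claim_equal_gen_overlap_dict : Prop := ∀ (kmerlist : List String), Dom_gen_overlap_dict kmerlist → Spec_gen_overlap_dict kmerlist (gen_overlap_dict kmerlist)

-- ===== LEMMAS AND PROOFS =====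

-- k is a candidate overlap: the k-prefix of p is the k-suffix of s
abbrev pvCand (p s : List Char) (k : Nat) : Prop := p.take k = s.drop (s.length - k)
-- k is a border of p.take j (prefix of p that is also a suffix of p.take j)
abbrev pvBord (p : List Char) (j k : Nat) : Prop := p.take k = (p.take j).drop (j - k)

-- the true overlap: the largest candidate
def pvOv (p s : List Char) : Nat := Nat.findGreatest (pvCand p s) (min p.length s.length)
-- the longest proper border of p.take j
def pvPi (p : List Char) (j : Nat) : Nat := Nat.findGreatest (pvBord p j) (j - 1)

-- A's per-pair value / B's per-pair value
def pvValA (kmer1 kmer2 : String) : Int :=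
  (PySem.List.pyRange 0 (min (PySem.Str.len kmer1) (PySem.Str.len kmer2) + 1) 1).foldl
    (fun (oc : Int) i =>
      if PySem.Str.slice kmer1 (some (-i)) none = PySem.Str.slice kmer2 none (some i) then i
      else oc) 0
def pvValB (a b : String) : Int :=
  ((a.toList.foldl (fun s c => pvStep b.toList (pvTable b.toList) s c) 0 : Nat) : Int)

-- canonical nested loop both ports are shown equal to
def pvCanon (ks : List String) (v : String → String → Int) : PySem.Dict String Int :=
  (List.range ks.length).foldl (fun d i =>
    (ks.eraseIdx i).foldl (fun d b =>
      d.insert (ks.getD i "" ++ "," ++ b) (v (ks.getD i "") b)) d) PySem.Dict.empty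

-- ---------- basic border / candidate facts ----------

lemma pvBord_self (p : List Char) (j : Nat) (_hj : j ≤ p.length) : pvBord p j j := by
  simp [pvBord]

lemma pvBord_zero (p : List Char) (j : Nat) (hj : j ≤ p.length) : pvBord p j 0 := by
  simp [pvBord, List.drop_eq_nil_of_le, List.length_take, hj]

lemma pvCand_zero (p s : List Char) : pvCand p s 0 := by
  simp [pvCand]

-- transitivity: a border of a border is a border
lemma pvBord_trans (p : List Char) {j' j k : Nat} (hk : k ≤ j) (hj : j ≤ j') (_hj' : j' ≤ p.length)
    (h1 : pvBord p j k) (h2 : pvBord p j' j) : pvBord p j' k := by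
  unfold pvBord at *
  rw [h1, h2, List.drop_drop]
  congr 1
  omega

-- squeeze: two borders of the same prefix, one below the other
lemma pvBord_squeeze (p : List Char) {j l k : Nat} (hk : k ≤ l) (hl : l ≤ j) (_hj : j ≤ p.length)
    (h1 : pvBord p j k) (h2 : pvBord p j l) : pvBord p l k := by
  unfold pvBord at *
  rw [h1, h2, List.drop_drop]
  congr 1
  omega

lemma pvCand_of_bord (p s : List Char) {j k : Nat} (hk : k ≤ j) (hj : j ≤ min p.length s.length)
    (hb : pvBord p j k) (hc : pvCand p s j) : pvCand p s k := by
  unfold pvBord pvCand at *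
  rw [hb, hc, List.drop_drop]
  congr 1
  omega

lemma pvBord_of_cand (p s : List Char) {j k : Nat} (hk : k ≤ j) (hj : j ≤ min p.length s.length)
    (hck : pvCand p s k) (hcj : pvCand p s j) : pvBord p j k := by
  unfold pvBord pvCand at *
  rw [hck, hcj, List.drop_drop]
  congr 1
  omega

lemma pvCand_ov (p s : List Char) : pvCand p s (pvOv p s) :=
  Nat.findGreatest_spec (Nat.zero_le _) (pvCand_zero p s)

lemma pvBord_pi (p : List Char) {j : Nat} (_hj1 : 1 ≤ j) (hj : j ≤ p.length) :
    pvBord p j (pvPi p j) :=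
  Nat.findGreatest_spec (Nat.zero_le _) (pvBord_zero p j hj)

lemma pvPi_lt (p : List Char) {j : Nat} (hj1 : 1 ≤ j) : pvPi p j < j := by
  have := Nat.findGreatest_le (P := pvBord p j) (j - 1)
  unfold pvPi
  omega

-- the border chain: borders of p.take j strictly below j = borders of p.take (pvPi p j)
lemma pvChain (p : List Char) {j : Nat} (hj1 : 1 ≤ j) (hj : j ≤ p.length) (k : Nat) :
    (k < j ∧ pvBord p j k) ↔ (k ≤ pvPi p j ∧ pvBord p (pvPi p j) k) := by
  have hpij : pvPi p j < j := pvPi_lt p hj1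
  have hbpi : pvBord p j (pvPi p j) := pvBord_pi p hj1 hj
  constructor
  · rintro ⟨hk, hb⟩
    have hkpi : k ≤ pvPi p j := Nat.le_findGreatest (by omega) hb
    exact ⟨hkpi, pvBord_squeeze p hkpi (by omega) hj hb hbpi⟩
  · rintro ⟨hk, hb⟩
    exact ⟨by omega, pvBord_trans p hk (by omega) hj hb hbpi⟩

-- ---------- candidate extension by one character ----------

lemma pvCand_append_succ (p s : List Char) (c : Char) (k : Nat)
    (hkp : k < p.length) (hks : k ≤ s.length) :
    pvCand p (s ++ [c]) (k + 1) ↔ (pvCand p s k ∧ p[k]? = some c) := by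
  unfold pvCand
  simp only [List.length_append, List.length_singleton]
  rw [show s.length + 1 - (k + 1) = s.length - k by omega,
    List.drop_append_of_le_length (by omega), List.take_add_one,
    List.getElem?_eq_getElem hkp]
  simp only [Option.toList_some]
  constructor
  · intro h
    have h2 := List.append_inj' h (by simp)
    refine ⟨h2.1, ?_⟩
    simpa using h2.2
  · rintro ⟨h1, h2⟩
    rw [h1]
    simpa using h2

lemma pvCand_append_pos (p s : List Char) (c : Char) {k : Nat}
    (h : pvCand p (s ++ [c]) (k + 1)) (hkp : k + 1 ≤ p.length) (hks : k ≤ s.length) :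
    pvCand p s k ∧ p[k]? = some c := by
  exact (pvCand_append_succ p s c k (by omega) hks).1 h

-- ---------- the table is the prefix function ----------

lemma pvBorderLoop_eq (p : List Char) (i : Nat) (_hi : i < p.length) :
    ∀ k, k ≤ i → pvBorderLoop p i k = Nat.findGreatest (pvBord p (i + 1)) k := by
  intro k
  induction k with
  | zero => intro _; simp [pvBorderLoop, Nat.findGreatest_zero]
  | succ k ih =>
    intro hk
    have harg : (p.take (i + 1)).drop (i + 1 - (k + 1)) = (p.drop (i - k)).take (k + 1) := by
      rw [Nat.succ_sub_succ, List.drop_take]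
      congr 1
      omega
    rw [pvBorderLoop, Nat.findGreatest_succ]
    unfold pvBord
    rw [harg, ih (by omega)]

lemma pvTable_getD (p : List Char) (j : Nat) (hj1 : 1 ≤ j) (hj : j ≤ p.length) :
    (pvTable p).getD (j - 1) 0 = pvPi p j := by
  unfold pvTable pvPi
  rw [List.getD_eq_getElem _ _ (by simp; omega)]
  simp only [List.getElem_map, List.getElem_range]
  rw [pvBorderLoop_eq p (j - 1) (by omega) (j - 1) le_rfl,
    show j - 1 + 1 = j by omega]

-- ---------- the automaton step ----------

-- E j c k: state k ≤ j is a border of p.take j that c extends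
abbrev pvExt (p : List Char) (j : Nat) (c : Char) (k : Nat) : Prop :=
  k ≤ j ∧ pvBord p j k ∧ p[k]? = some c

lemma pvStep_spec (p : List Char) (c : Char) :
    ∀ j, j ≤ p.length →
      (pvStep p (pvTable p) j c = 0 ∧ ∀ k, ¬ pvExt p j c k) ∨
      (∃ k, pvStep p (pvTable p) j c = k + 1 ∧ pvExt p j c k ∧ ∀ k', pvExt p j c k' → k' ≤ k) := by
  intro j
  induction j using Nat.strong_induction_on with
  | _ j ih =>
    intro hj
    rw [pvStep]
    by_cases h1 : p[j]? = some c
    · right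
      refine ⟨j, by rw [if_pos h1], ⟨le_rfl, pvBord_self p j hj, h1⟩, fun k' hk' => hk'.1⟩
    · by_cases h2 : j = 0
      · left
        subst h2
        rw [if_neg h1, if_pos rfl]
        refine ⟨rfl, ?_⟩
        rintro k ⟨hk, _, hc⟩
        interval_cases k
        exact h1 hc
      · have hj1 : 1 ≤ j := by omega
        have hpi : pvPi p j < j := pvPi_lt p hj1
        have hmin : min ((pvTable p).getD (j - 1) 0) (j - 1) = pvPi p j := by
          rw [pvTable_getD p j hj1 hj]
          omega
        rw [if_neg h1, if_neg h2, hmin]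
        have hiff : ∀ k, pvExt p j c k ↔ pvExt p (pvPi p j) c k := by
          intro k
          constructor
          · rintro ⟨hk, hb, hc⟩
            have hkj : k < j := by
              by_contra hcon
              have hkj' : k = j := by omega
              rw [hkj'] at hc
              exact h1 hc
            have h3 := (pvChain p hj1 hj k).1 ⟨hkj, hb⟩
            exact ⟨h3.1, h3.2, hc⟩
          · rintro ⟨hk, hb, hc⟩
            have h3 := (pvChain p hj1 hj k).2 ⟨hk, hb⟩
            exact ⟨Nat.le_of_lt h3.1, h3.2, hc⟩
        rcases ih (pvPi p j) hpi (by omega) with ⟨h0, hnone⟩ | ⟨k, hstep, hext, hmax⟩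
        · left
          exact ⟨h0, fun k hk => hnone k ((hiff k).1 hk)⟩
        · right
          exact ⟨k, hstep, (hiff k).2 hext, fun k' hk' => hmax k' ((hiff k').1 hk')⟩

-- ---------- the run computes the overlap ----------

lemma pvOv_nil (p : List Char) : pvOv p [] = 0 := by
  simp [pvOv, Nat.findGreatest_zero]

lemma pvStep_ov (p s : List Char) (c : Char) :
    pvStep p (pvTable p) (pvOv p s) c = pvOv p (s ++ [c]) := by
  set j := pvOv p s with hjdef
  have hjmin : j ≤ min p.length s.length := Nat.findGreatest_le _
  have hcj : pvCand p s j := pvCand_ov p s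
  have hole : pvOv p (s ++ [c]) ≤ min p.length (s.length + 1) := by
    have := Nat.findGreatest_le (P := pvCand p (s ++ [c])) (min p.length ((s ++ [c]).length))
    simpa [pvOv] using this
  have hco : pvCand p (s ++ [c]) (pvOv p (s ++ [c])) := pvCand_ov p (s ++ [c])
  have extract : ∀ k', pvCand p (s ++ [c]) (k' + 1) → k' + 1 ≤ min p.length (s.length + 1) →
      pvExt p j c k' := by
    intro k' hc hle
    have h1 := pvCand_append_pos p s c hc (by omega) (by omega)
    have hk'j : k' ≤ j := Nat.le_findGreatest (by omega) h1.1
    exact ⟨hk'j, pvBord_of_cand p s hk'j hjmin h1.1 hcj, h1.2⟩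
  rcases pvStep_spec p c j (by omega) with ⟨h0, hnone⟩ | ⟨k, hstep, ⟨hkj, hbord, hck⟩, hmax⟩
  · rw [h0]
    by_contra hne
    rcases Nat.exists_eq_succ_of_ne_zero (fun h => hne h.symm) with ⟨k', hk'⟩
    rw [hk'] at hco hole
    exact hnone k' (extract k' hco hole)
  · rw [hstep]
    have hkp : k < p.length := by
      rcases List.getElem?_eq_some_iff.mp hck with ⟨h, _⟩
      exact h
    have hcand : pvCand p (s ++ [c]) (k + 1) :=
      (pvCand_append_succ p s c k hkp (by omega)).2
        ⟨pvCand_of_bord p s hkj hjmin hbord hcj, hck⟩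
    have le1 : k + 1 ≤ pvOv p (s ++ [c]) := by
      apply Nat.le_findGreatest _ hcand
      simp only [List.length_append, List.length_singleton]
      omega
    have le2 : pvOv p (s ++ [c]) ≤ k + 1 := by
      rcases Nat.eq_zero_or_pos (pvOv p (s ++ [c])) with h | h
      · omega
      · rcases Nat.exists_eq_succ_of_ne_zero (n := pvOv p (s ++ [c])) (by omega) with ⟨k', hk'⟩
        rw [hk'] at hco hole ⊢
        have := hmax k' (extract k' hco hole)
        omega
    omega

lemma pvRun (p : List Char) (s : List Char) :
    s.foldl (fun j c => pvStep p (pvTable p) j c) 0 = pvOv p s := by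
  induction s using List.reverseRecOn with
  | nil => simp [pvOv_nil]
  | append_singleton s c ih => rw [List.foldl_append, List.foldl_cons, List.foldl_nil, ih, pvStep_ov]

-- ---------- A's inner loop computes the overlap ----------

lemma pvFoldl_lastmatch (C C' : Nat → Prop) [DecidablePred C] [DecidablePred C'] (m : Nat)
    (h : ∀ i, 1 ≤ i → i ≤ m → (C i ↔ C' i)) :
    ((List.range (m + 1)).foldl (fun (acc : Int) i => if C i then (i : Int) else acc) 0)
      = Int.ofNat (Nat.findGreatest C' m) := by
  induction m with
  | zero =>
    simp only [Nat.findGreatest_zero]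
    by_cases hC : C 0 <;> simp [hC]
  | succ m ih =>
    rw [List.range_succ, List.foldl_append, List.foldl_cons, List.foldl_nil,
      Nat.findGreatest_succ]
    by_cases hc : C (m + 1)
    · rw [if_pos hc, if_pos ((h (m + 1) (by omega) le_rfl).1 hc)]
      rfl
    · rw [if_neg hc, if_neg (fun hc' => hc ((h (m + 1) (by omega) le_rfl).2 hc')),
        ih (fun i h1 h2 => h i h1 (by omega))]

lemma pvValA_eq (k1 k2 : String) : pvValA k1 k2 = (pvOv k2.toList k1.toList : Int) := by
  unfold pvValA
  have hm : min (PySem.Str.len k1) (PySem.Str.len k2) + 1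
      = ((min k2.toList.length k1.toList.length + 1 : Nat) : Int) := by
    simp only [PySem.Str.len_eq]
    push_cast
    omega
  rw [hm, PySem.List.pyRange_zero_natCast, List.foldl_map]
  have hcond : ∀ i, 1 ≤ i → i ≤ min k2.toList.length k1.toList.length →
      ((PySem.Str.slice k1 (some (-(i : Int))) none = PySem.Str.slice k2 none (some (i : Int)))
        ↔ pvCand k2.toList k1.toList i) := by
    intro i h1 h2
    have e1 : (PySem.Str.slice k1 (some (-(i : Int))) none).toList
        = k1.toList.drop (k1.toList.length - i) := by
      rw [PySem.Str.toList_slice, PySem.Chars.slice_eq_listSlice]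
      exact PySem.List.slice_from_neg_natCast _ i (by omega)
    have e2 : (PySem.Str.slice k2 none (some (i : Int))).toList = k2.toList.take i := by
      rw [PySem.Str.toList_slice, PySem.Chars.slice_eq_listSlice]
      exact PySem.List.slice_to_natCast _ i
    rw [String.ext_iff, e1, e2]
    unfold pvCand
    exact eq_comm
  rw [pvFoldl_lastmatch
    (C := fun i => PySem.Str.slice k1 (some (-(i : Int))) none
      = PySem.Str.slice k2 none (some (i : Int)))
    (C' := pvCand k2.toList k1.toList) _ hcond]
  rfl

lemma pvValB_eq (a b : String) : pvValB a b = (pvOv b.toList a.toList : Int) := by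
  unfold pvValB
  rw [pvRun]

lemma pvVal_eq : pvValA = pvValB := by
  funext a b
  rw [pvValA_eq, pvValB_eq]

-- ---------- shape of port A ----------

lemma pvGetD_one_cons {α : Type} (a b : α) (d : α) :
    PySem.List.pyGetD [a, b] 1 d = b := by
  simp [PySem.List.pyGetD, PySem.List.pyGet?, PySem.List.pyIdx?]

lemma pvPermOne (m : List String) :
    PySem.List.permutations m 1 = m.map (fun y => [y]) := by
  induction m with
  | nil => simp [PySem.List.permutations]
  | cons y m ih =>
    simp only [PySem.List.permutations] at ih ⊢
    rw [List.length_cons, List.range_succ_eq_map, List.flatMap_cons, List.flatMap_map]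
    simp only [List.getElem?_cons_zero, List.getElem?_cons_succ, Nat.succ_eq_add_one]
    rw [ih]
    simp

lemma pvPerm2 (l : List String) :
    PySem.List.permutations l 2 =
      (List.range l.length).flatMap
        (fun i => (l.eraseIdx i).map (fun b => [l.getD i "", b])) := by
  rw [PySem.List.permutations]
  rw [List.flatMap_def, List.flatMap_def]
  congr 1
  apply List.map_congr_left
  intro i hi
  rw [List.mem_range] at hi
  rw [List.getElem?_eq_getElem hi]
  dsimp only
  rw [pvPermOne (l.eraseIdx i), List.map_map, List.getD_eq_getElem _ _ hi]
  rfl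

lemma pvA_canon (ks : List String) : gen_overlap_dict ks = (pvCanon ks pvValA).items := by
  unfold gen_overlap_dict pvCanon pvValA
  dsimp only
  rw [pvPerm2, List.foldl_flatMap]
  simp only [List.foldl_map, PySem.List.pyGetD_zero_cons, pvGetD_one_cons]

-- ---------- shape of port B ----------

lemma pvEnumerate_eq (L : List String) (s : Int) :
    PySem.List.enumerate L s = (List.range L.length).map (fun (t : Nat) => ((s + (t : Int), L.getD t "") : Int × String)) := by
  induction L generalizing s with
  | nil => simp [PySem.List.enumerate]
  | cons x L ih =>
    rw [PySem.List.enumerate_cons, List.length_cons, List.range_succ_eq_map, List.map_cons,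
      List.map_map, ih (s + 1)]
    simp only [Nat.cast_zero, add_zero, List.getD_cons_zero, List.cons.injEq, true_and]
    apply List.map_congr_left
    intro t _
    simp only [Function.comp_apply, Nat.succ_eq_add_one, List.getD_cons_succ,
      Prod.mk.injEq, and_true]
    push_cast
    ring

lemma pvFilterEnum (β : Type) (L : List β) (s : Int) (k : Nat) :
    ((PySem.List.enumerate L s).filter (fun q => decide (¬ q.1 = s + (k : Int)))).map (fun q => q.2)
      = L.eraseIdx k := by
  induction L generalizing s k with
  | nil => simp
  | cons x L ih =>
    cases k with
    | zero =>
      rw [PySem.List.enumerate_cons, List.eraseIdx_cons_zero, List.filter_cons]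
      have hhead : (decide (¬((s, x) : Int × β).1 = s + ((0 : Nat) : Int))) = false := by simp
      rw [hhead]
      simp only [Bool.false_eq_true, if_false]
      have hall : (PySem.List.enumerate L (s + 1)).filter
          (fun q => decide (¬q.1 = s + ((0 : Nat) : Int))) = PySem.List.enumerate L (s + 1) := by
        rw [List.filter_eq_self]
        intro q hq
        rcases (PySem.List.mem_enumerate_iff L (s + 1) q).1 hq with ⟨t, ht, rfl⟩
        simp only [decide_eq_true_eq]
        push_cast
        omega
      rw [hall, PySem.List.map_snd_enumerate]
    | succ k =>
      have hcast : (s + ((k + 1 : Nat) : Int)) = (s + 1) + (k : Int) := by push_cast; ring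
      rw [PySem.List.enumerate_cons, List.eraseIdx_cons_succ, List.filter_cons]
      have hhead : (decide (¬((s, x) : Int × β).1 = s + ((k + 1 : Nat) : Int))) = true := by
        simp only [decide_eq_true_eq]
        push_cast
        omega
      rw [hhead, if_pos rfl, List.map_cons]
      congr 1
      rw [hcast, ih (s + 1) k]

lemma pvB_canon (ks : List String) : gen_overlap_dict_alt ks = (pvCanon ks pvValB).items := by
  unfold gen_overlap_dict_alt pvCanon pvValB
  dsimp only
  rw [pvEnumerate_eq ks 0, List.foldl_map]
  congr 1
  apply PySem.List.foldl_congr_mem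
  intro d t ht
  rw [List.mem_range] at ht
  dsimp only
  simp only [zero_add]
  rw [PySem.List.foldl_ite_eq_foldl_filter
    (p := fun (jbt : Int × (String × List Nat)) => ((t : Nat) : Int) ≠ jbt.1)]
  have hfc : (PySem.List.enumerate (ks.zip (ks.map fun k => pvTable k.toList)) 0).filter
        (fun x => decide (((t : Nat) : Int) ≠ x.1))
      = (PySem.List.enumerate (ks.zip (ks.map fun k => pvTable k.toList)) 0).filter
        (fun q => decide (¬q.1 = 0 + ((t : Nat) : Int))) := by
    apply List.filter_congr
    intro q _
    simp only [decide_eq_decide]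
    constructor <;> intro h <;> omega
  rw [hfc]
  rw [← List.foldl_map (f := fun (q : Int × (String × List Nat)) => q.2)
    (g := fun out (bt : String × List Nat) => PySem.Dict.insert out
      (ks.getD t "" ++ "," ++ bt.1)
      ((List.foldl (fun s c => pvStep bt.1.toList bt.2 s c) 0 (ks.getD t "").toList : Nat) : Int))]
  rw [pvFilterEnum _ _ 0 t]
  rw [← List.map_prod_left_eq_zip, List.eraseIdx_map, List.foldl_map]

-- ===== VERDICT (by name: the statement is the Claim_ definition above) =====
theorem gen_overlap_dict_spec : Claim_equal_gen_overlap_dict := by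
  intro ks _
  show gen_overlap_dict ks = gen_overlap_dict_alt ks
  rw [pvA_canon, pvB_canon, pvVal_eq]
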